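-- pv_equiv track=rewrite | github.com/RehmozAyub/tools-for-everyone | QR Code Studio/qr_code_studio.py | build_wifi_payload
-- ===== SOURCE A (Python) =====
-- def build_wifi_payload(ssid, password, security, hidden):
--     """Build WiFi QR code payload string."""
--     # Escape special characters in SSID and password
--     special = ['\\', ';', ',', '"', ':']
--     escaped_ssid = ssid
--     escaped_pw = password
--     for ch in special:
--         escaped_ssid = escaped_ssid.replace(ch, f"\\{ch}")
--         escaped_pw = escaped_pw.replace(ch, f"\\{ch}")
--
--     hidden_str = "H:true" if hidden else ""
--     if security == "None":
--         return f"WIFI:S:{escaped_ssid};T:nopass;{hidden_str};;"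
--     return f"WIFI:S:{escaped_ssid};T:{security};P:{escaped_pw};{hidden_str};;"
-- ===== SOURCE B (Python) =====
-- _SPECIAL = frozenset('\\;,":')
--
-- def _escape(s):
--     # single left-to-right pass; each special character gets exactly one backslash
--     return ''.join('\\' + ch if ch in _SPECIAL else ch for ch in s)
--
-- def build_wifi_payload(ssid, password, security, hidden):
--     """Build WiFi QR code payload string."""
--     escaped_ssid = _escape(ssid)
--     escaped_pw = _escape(password)
--     hidden_str = "H:true" if hidden else ""
--     if security == "None":
--         return f"WIFI:S:{escaped_ssid};T:nopass;{hidden_str};;"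
--     return f"WIFI:S:{escaped_ssid};T:{security};P:{escaped_pw};{hidden_str};;"
-- ===== Notes on version B (the rewrite author's own statement) =====
-- stated objective: simpler
-- what changed: Replaced the five sequential str.replace passes over both strings with one single left-to-right scan per string that prefixes each special character with a backslash.
import Mathlib
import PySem

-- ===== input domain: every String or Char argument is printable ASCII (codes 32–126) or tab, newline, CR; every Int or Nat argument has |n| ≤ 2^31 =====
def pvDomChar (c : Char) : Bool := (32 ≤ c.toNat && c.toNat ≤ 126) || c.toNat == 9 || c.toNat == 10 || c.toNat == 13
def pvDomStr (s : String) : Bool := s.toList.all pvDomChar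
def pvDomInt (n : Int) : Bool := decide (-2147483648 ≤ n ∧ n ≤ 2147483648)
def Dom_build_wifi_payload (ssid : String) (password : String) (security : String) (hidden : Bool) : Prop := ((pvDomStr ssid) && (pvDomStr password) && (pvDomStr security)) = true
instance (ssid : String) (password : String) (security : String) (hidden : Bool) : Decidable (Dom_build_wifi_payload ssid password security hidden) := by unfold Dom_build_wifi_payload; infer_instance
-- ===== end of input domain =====

-- B replaces A's five sequential replace passes with one single scan per string that
-- prefixes each special character with a backslash (simpler, same result).


-- ===== PORT A =====
def build_wifi_payload (ssid : String) (password : String) (security : String) (hidden : Bool) : String :=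
  let special : List String := ["\\", ";", ",", "\"", ":"]
  let esc := special.foldl
    (fun (st : String × String) ch =>
      (PySem.Str.replace st.1 ch ("\\" ++ ch), PySem.Str.replace st.2 ch ("\\" ++ ch)))
    (ssid, password)
  let hidden_str := if hidden then "H:true" else ""
  if security == "None" then
    "WIFI:S:" ++ esc.1 ++ ";T:nopass;" ++ hidden_str ++ ";;"
  else
    "WIFI:S:" ++ esc.1 ++ ";T:" ++ security ++ ";P:" ++ esc.2 ++ ";" ++ hidden_str ++ ";;"

-- ===== PORT B =====
def pvEscape (s : String) : String :=
  String.ofList (s.toList.flatMap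
    (fun c => if c ∈ ['\\', ';', ',', '"', ':'] then ['\\', c] else [c]))

def build_wifi_payload_alt (ssid : String) (password : String) (security : String) (hidden : Bool) : String :=
  let escaped_ssid := pvEscape ssid
  let escaped_pw := pvEscape password
  let hidden_str := if hidden then "H:true" else ""
  if security == "None" then
    "WIFI:S:" ++ escaped_ssid ++ ";T:nopass;" ++ hidden_str ++ ";;"
  else
    "WIFI:S:" ++ escaped_ssid ++ ";T:" ++ security ++ ";P:" ++ escaped_pw ++ ";" ++ hidden_str ++ ";;"

-- ===== PRECONDITION & SPEC =====
def Spec_build_wifi_payload (ssid : String) (password : String) (security : String) (hidden : Bool) (out : String) : Prop := out = build_wifi_payload_alt ssid password security hidden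
instance (ssid : String) (password : String) (security : String) (hidden : Bool) (out : String) : Decidable (Spec_build_wifi_payload ssid password security hidden out) := by unfold Spec_build_wifi_payload; infer_instance

-- ===== CLAIM (what is proved, stated in full; the proofs are below) =====
def Claim_equal_build_wifi_payload : Prop := ∀ (ssid : String) (password : String) (security : String) (hidden : Bool), Dom_build_wifi_payload ssid password security hidden → Spec_build_wifi_payload ssid password security hidden (build_wifi_payload ssid password security hidden)

-- ===== LEMMAS AND PROOFS =====

-- single-character-pattern replace is an elementwise flatMap
theorem replace_go_single (p : Char) (new : List Char) (l : List Char) :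
    ∀ (fuel : Nat) (acc : List Char), l.length ≤ fuel →
      PySem.Chars.replace.go [p] new fuel l acc
        = acc.reverse ++ l.flatMap (fun c => if c = p then new else [c]) := by
  induction l with
  | nil =>
      intro fuel acc _
      cases fuel <;> simp [PySem.Chars.replace.go]
  | cons c t ih =>
      intro fuel acc h
      cases fuel with
      | zero => simp at h
      | succ fuel =>
        by_cases hc : c = p
        · simp only [PySem.Chars.replace.go, List.isPrefixOf, List.flatMap_cons]
          rw [if_pos (by simp [hc])]
          rw [show List.drop [p].length (c :: t) = t from rfl]
          rw [ih fuel (new.reverse ++ acc) (by simpa using Nat.lt_succ_iff.mp (Nat.lt_of_lt_of_le (by simp) h))]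
          simp [hc]
        · simp only [PySem.Chars.replace.go, List.isPrefixOf, List.flatMap_cons]
          rw [if_neg (by simp [Ne.symm hc])]
          rw [ih fuel (c :: acc) (by simpa using Nat.lt_succ_iff.mp (Nat.lt_of_lt_of_le (by simp) h))]
          simp [hc]

theorem replace_single (p : Char) (new s : List Char) :
    PySem.Chars.replace s [p] new = s.flatMap (fun c => if c = p then new else [c]) := by
  rw [PySem.Chars.replace]
  simp only [List.isEmpty_cons]
  exact replace_go_single p new s s.length [] le_rfl

theorem flatMap_comp (f g : Char → List Char) (l : List Char) :
    (l.flatMap f).flatMap g = l.flatMap (fun c => (f c).flatMap g) := by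
  induction l with
  | nil => simp
  | cons c t ih => simp [ih]

-- the five sequential single-char replaces collapse to one pass
theorem chain_eq_escape (s : String) :
    PySem.Str.replace (PySem.Str.replace (PySem.Str.replace (PySem.Str.replace
      (PySem.Str.replace s "\\" "\\\\") ";" "\\;") "," "\\,") "\"" "\\\"") ":" "\\:"
      = pvEscape s := by
  simp only [PySem.Str.replace, pvEscape, String.toList_ofList]
  congr 1
  have h : ∀ (cs : List Char),
      PySem.Chars.replace (PySem.Chars.replace (PySem.Chars.replace (PySem.Chars.replace
        (PySem.Chars.replace cs "\\".toList "\\\\".toList) ";".toList "\\;".toList)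
        ",".toList "\\,".toList) "\"".toList "\\\"".toList) ":".toList "\\:".toList
        = cs.flatMap (fun c => if c ∈ ['\\', ';', ',', '"', ':'] then ['\\', c] else [c]) := by
    intro cs
    have e1 : ("\\" : String).toList = ['\\'] := by decide
    have e2 : (";" : String).toList = [';'] := by decide
    have e3 : ("," : String).toList = [','] := by decide
    have e4 : ("\"" : String).toList = ['"'] := by decide
    have e5 : (":" : String).toList = [':'] := by decide
    rw [e1, e2, e3, e4, e5]
    simp only [replace_single, flatMap_comp]
    apply List.flatMap_congr
    intro c _
    by_cases h1 : c = '\\' <;> by_cases h2 : c = ';' <;> by_cases h3 : c = ',' <;>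
      by_cases h4 : c = '"' <;> by_cases h5 : c = ':' <;>
      simp_all
  exact h s.toList

-- ===== VERDICT (by name: the statement is the Claim_ definition above) =====
theorem build_wifi_payload_spec : Claim_equal_build_wifi_payload := by
  intro ssid password security hidden _
  unfold Spec_build_wifi_payload build_wifi_payload build_wifi_payload_alt
  simp only [List.foldl]
  rw [show ("\\" ++ "\\" : String) = "\\\\" from rfl, show ("\\" ++ ";" : String) = "\\;" from rfl,
      show ("\\" ++ "," : String) = "\\," from rfl, show ("\\" ++ "\"" : String) = "\\\"" from rfl,
      show ("\\" ++ ":" : String) = "\\:" from rfl]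
  rw [chain_eq_escape ssid, chain_eq_escape password]
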